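-- pv_equiv track=rewrite | github.com/zhangkai98/ProgrammingForThePuzzledBook | Puzzle11/tiling-ex1.py | belongOneLTile
-- ===== SOURCE A (Python) =====
-- def belongOneLTile(threeMiss):
-- 	originR, originC = threeMiss[0][0], threeMiss[0][1]
-- 	for i in range(len(threeMiss)):
-- 		if threeMiss[i][0] < originR:
-- 			originR = threeMiss[i][0]
-- 		if threeMiss[i][1] < originC:
-- 			originC = threeMiss[i][1]
--
-- 	for j in range(4):
-- 		threePieces = [(originR+r, originC+c) for (r,c) in [(0, 0), (0, 1), (1, 0), (1, 1)]]
-- 		threePieces.pop(j)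
-- 		res = True
-- 		for piece in threePieces:
-- 			res = res and (piece in threeMiss)
-- 		if res:
-- 			break
--
-- 	return res
-- ===== SOURCE B (Python) =====
-- def belongOneLTile(threeMiss):
--     originR = min(p[0] for p in threeMiss)
--     originC = min(p[1] for p in threeMiss)
--     block = [(originR, originC), (originR, originC + 1),
--              (originR + 1, originC), (originR + 1, originC + 1)]
--     return sum(p in threeMiss for p in block) >= 3
-- ===== Notes on version B (the rewrite author's own statement) =====
-- stated objective: simpler
-- what changed: Replaces the four-orientation loop with pop/inner-and-loop/break by a single count of how many of the four 2x2-block cells are present (>= 3), and computes the origin with two min() calls instead of a running-min loop.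
import Mathlib
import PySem

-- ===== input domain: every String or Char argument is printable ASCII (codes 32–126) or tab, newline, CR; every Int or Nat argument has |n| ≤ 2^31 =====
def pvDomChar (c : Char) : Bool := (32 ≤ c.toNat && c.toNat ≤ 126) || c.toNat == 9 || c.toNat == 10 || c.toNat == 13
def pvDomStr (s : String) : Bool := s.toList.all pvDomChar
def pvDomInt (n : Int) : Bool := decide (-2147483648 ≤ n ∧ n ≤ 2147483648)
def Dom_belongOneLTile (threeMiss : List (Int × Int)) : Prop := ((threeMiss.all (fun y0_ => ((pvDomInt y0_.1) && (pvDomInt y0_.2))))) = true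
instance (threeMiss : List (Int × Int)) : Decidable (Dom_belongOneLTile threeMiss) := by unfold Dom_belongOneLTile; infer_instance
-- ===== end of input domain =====

-- B replaces A's four-orientation pop/break loop by counting how many of the four 2x2-block
-- cells are present (>= 3), with mins computed directly: simpler, same behaviour.


-- ===== PORT A =====
def belongOneLTile (threeMiss : List (Int × Int)) : Bool :=
  match threeMiss with
  | [] => false  -- Python raises IndexError on threeMiss[0]; excluded by Pre_
  | p0 :: _ =>
    -- running-min loop over the whole list, seeded from threeMiss[0]
    let origin : Int × Int := threeMiss.foldl
      (fun o q => (if q.1 < o.1 then q.1 else o.1, if q.2 < o.2 then q.2 else o.2))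
      (p0.1, p0.2)
    -- for j in range(4): build block, pop(j), and-fold membership, break on success
    (List.range 4).foldl
      (fun res j =>
        if res then res
        else
          (((([((0:Int),(0:Int)), (0,1), (1,0), (1,1)] : List (Int × Int)).map
              (fun rc => (origin.1 + rc.1, origin.2 + rc.2))).eraseIdx j).foldl
            (fun r piece => r && threeMiss.contains piece) true))
      false

-- ===== PORT B =====
def belongOneLTile_alt (threeMiss : List (Int × Int)) : Bool :=
  match PySem.List.min? (threeMiss.map Prod.fst) (fun x => x),
        PySem.List.min? (threeMiss.map Prod.snd) (fun x => x) with
  | some originR, some originC =>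
    let block : List (Int × Int) :=
      [(originR, originC), (originR, originC + 1), (originR + 1, originC), (originR + 1, originC + 1)]
    decide (3 ≤ block.countP (fun p => threeMiss.contains p))
  | _, _ => false  -- Python: min() raises ValueError on the empty list; excluded by Pre_

-- ===== PRECONDITION & SPEC =====
-- Pre_ excludes only the empty list, on which A raises IndexError (and B raises ValueError).
def Pre_belongOneLTile (threeMiss : List (Int × Int)) : Prop := threeMiss ≠ []
instance (threeMiss : List (Int × Int)) : Decidable (Pre_belongOneLTile threeMiss) := by unfold Pre_belongOneLTile; infer_instance
def pvWitness_belongOneLTile : (List (Int × Int)) := [(0,0),(0,1),(1,0)]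
def Spec_belongOneLTile (threeMiss : List (Int × Int)) (out : Bool) : Prop := out = belongOneLTile_alt threeMiss
instance (threeMiss : List (Int × Int)) (out : Bool) : Decidable (Spec_belongOneLTile threeMiss out) := by unfold Spec_belongOneLTile; infer_instance

-- ===== CLAIM (what is proved, stated in full; the proofs are below) =====
def Claim_equal_belongOneLTile : Prop := ∀ (threeMiss : List (Int × Int)), Dom_belongOneLTile threeMiss → Pre_belongOneLTile threeMiss → Spec_belongOneLTile threeMiss (belongOneLTile threeMiss)

-- ===== LEMMAS AND PROOFS =====

-- A's paired running-min fold is the two component-wise min folds.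
theorem fold_min_pair (l : List (Int × Int)) (a b : Int) :
    l.foldl (fun o q => (if q.1 < o.1 then q.1 else o.1, if q.2 < o.2 then q.2 else o.2)) (a, b)
      = (l.foldl (fun x q => min x q.1) a, l.foldl (fun y q => min y q.2) b) := by
  induction l generalizing a b with
  | nil => rfl
  | cons h t ih =>
      simp only [List.foldl_cons, ih]
      congr 1 <;> (rw [min_def]; split_ifs <;> omega)

theorem fold_min_fst (l : List (Int × Int)) (a : Int) :
    l.foldl (fun x q => min x q.1) a = (l.map Prod.fst).foldl min a := by
  induction l generalizing a with
  | nil => rfl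
  | cons h t ih => simp [List.foldl_cons, ih]

theorem fold_min_snd (l : List (Int × Int)) (a : Int) :
    l.foldl (fun y q => min y q.2) a = (l.map Prod.snd).foldl min a := by
  induction l generalizing a with
  | nil => rfl
  | cons h t ih => simp [List.foldl_cons, ih]

theorem if_bool_or (b c : Bool) : (if b = true then b else c) = (b || c) := by
  cases b <;> simp

-- The orientation/pop/break loop over the four block cells equals the count-≥-3 test.
theorem orient_eq_count (l : List (Int × Int)) (R C : Int) :
    (List.range 4).foldl
      (fun res j =>
        if res then res
        else
          (((([((0:Int),(0:Int)), (0,1), (1,0), (1,1)] : List (Int × Int)).map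
              (fun rc => (R + rc.1, C + rc.2))).eraseIdx j).foldl
            (fun r piece => r && l.contains piece) true))
      false
    = decide (3 ≤ ([(R, C), (R, C + 1), (R + 1, C), (R + 1, C + 1)] : List (Int × Int)).countP
        (fun p => l.contains p)) := by
  simp only [show List.range 4 = [0,1,2,3] from rfl, List.map, List.foldl, List.eraseIdx,
    add_zero, List.countP, List.countP.go, if_bool_or, Bool.false_or]
  by_cases h0 : (R, C) ∈ l <;> by_cases h1 : (R, C + 1) ∈ l <;>
    by_cases h2 : (R + 1, C) ∈ l <;> by_cases h3 : (R + 1, C + 1) ∈ l <;>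
    simp [h0, h1, h2, h3]

-- ===== VERDICT (by name: the statement is the Claim_ definition above) =====
theorem belongOneLTile_spec : Claim_equal_belongOneLTile := by
  intro l _ hpre
  match l, hpre with
  | p0 :: t, _ =>
    show belongOneLTile (p0 :: t) = belongOneLTile_alt (p0 :: t)
    unfold belongOneLTile belongOneLTile_alt
    simp only [fold_min_pair, fold_min_fst, fold_min_snd, List.map_cons, List.foldl_cons,
      ite_self, PySem.List.min?_id_cons]
    exact orient_eq_count (p0 :: t) _ _
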